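-- pv_equiv track=rewrite | github.com/RobertGuerra/Projects | Edabit Practice Problems/H-Z/Special Array.py | is_special_array
-- ===== SOURCE A (Python) =====
-- def is_special_array(lst):
--     length = len(lst)
--     button = True
--
--     i = 0
--     while i < length:
--         if lst[i] % 2 == 0 and button is True:
--             button = not button
--             i += 1
--             continue
--         elif lst[i] % 2 != 0 and button is False:
--             button = not button
--             i += 1
--             continue
--         else:
--             return False
--
--     return True
-- ===== SOURCE B (Python) =====
-- def is_special_array(lst):
--     return (all(x % 2 == 0 for x in lst[::2])
--             and all(x % 2 == 1 for x in lst[1::2]))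
-- ===== Notes on version B (the rewrite author's own statement) =====
-- stated objective: simpler
-- what changed: Replaces the index/toggling-boolean while loop with a partition by index parity: slice the even-indexed and odd-indexed elements and check each group with a separate all().
import Mathlib
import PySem

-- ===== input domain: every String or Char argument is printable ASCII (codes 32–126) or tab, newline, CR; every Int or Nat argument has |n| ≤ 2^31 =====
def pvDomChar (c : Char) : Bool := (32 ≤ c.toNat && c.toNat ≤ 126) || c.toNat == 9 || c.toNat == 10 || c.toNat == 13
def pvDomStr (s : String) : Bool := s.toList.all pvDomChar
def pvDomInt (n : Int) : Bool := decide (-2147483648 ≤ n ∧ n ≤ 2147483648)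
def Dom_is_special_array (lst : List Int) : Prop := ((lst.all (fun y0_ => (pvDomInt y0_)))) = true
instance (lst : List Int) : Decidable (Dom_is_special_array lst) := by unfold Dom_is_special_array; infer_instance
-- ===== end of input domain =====

-- B replaces A's toggling-boolean while loop with a partition by index parity
-- (even-indexed slice all even, odd-indexed slice all odd): simpler decomposition, same cost.


-- ===== PORT A =====
-- A's while loop over index i with the toggling 'button', as the obvious structural
-- recursion over the remaining list with the same 'button' state.
def is_special_array_loop : List Int → Bool → Bool
  | [], _ => true
  | x :: xs, button =>
    if PySem.Int.mod x 2 == 0 && button then is_special_array_loop xs (!button)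
    else if !(PySem.Int.mod x 2 == 0) && !button then is_special_array_loop xs (!button)
    else false

def is_special_array (lst : List Int) : Bool := is_special_array_loop lst true

-- ===== PORT B =====
-- lst[::2] / lst[1::2]: every other element starting at 0 (lst[1::2] = everyOther of the tail).
def pvEveryOther : List Int → List Int
  | [] => []
  | [x] => [x]
  | x :: _ :: xs => x :: pvEveryOther xs

def is_special_array_alt (lst : List Int) : Bool :=
  ((pvEveryOther lst).all fun x => PySem.Int.mod x 2 == 0) &&
  ((pvEveryOther lst.tail).all fun x => PySem.Int.mod x 2 == 1)

-- ===== PRECONDITION & SPEC =====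
def Spec_is_special_array (lst : List Int) (out : Bool) : Prop := out = is_special_array_alt lst
instance (lst : List Int) (out : Bool) : Decidable (Spec_is_special_array lst out) := by unfold Spec_is_special_array; infer_instance

-- ===== CLAIM (what is proved, stated in full; the proofs are below) =====
def Claim_equal_is_special_array : Prop := ∀ (lst : List Int), Dom_is_special_array lst → Spec_is_special_array lst (is_special_array lst)

-- ===== LEMMAS AND PROOFS =====

theorem pvEveryOther_cons (x : Int) (xs : List Int) :
    pvEveryOther (x :: xs) = x :: pvEveryOther xs.tail := by
  cases xs <;> simp [pvEveryOther]

theorem pvMod2 (x : Int) : PySem.Int.mod x 2 = x % 2 := by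
  simp [PySem.Int.mod, Int.fmod_eq_emod]

theorem loop_eq (lst : List Int) :
    (is_special_array_loop lst true =
      (((pvEveryOther lst).all fun x => PySem.Int.mod x 2 == 0) &&
       ((pvEveryOther lst.tail).all fun x => PySem.Int.mod x 2 == 1))) ∧
    (is_special_array_loop lst false =
      (((pvEveryOther lst).all fun x => PySem.Int.mod x 2 == 1) &&
       ((pvEveryOther lst.tail).all fun x => PySem.Int.mod x 2 == 0))) := by
  induction lst with
  | nil => simp [is_special_array_loop, pvEveryOther]
  | cons x xs ih =>
    rcases ih with ⟨ih1, ih0⟩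
    simp only [pvMod2] at ih1 ih0
    rcases Int.emod_two_eq x with h | h <;>
      simp [is_special_array_loop, pvMod2, pvEveryOther_cons, h, ih1, ih0,
        Bool.and_comm, Bool.and_left_comm]

-- ===== VERDICT (by name: the statement is the Claim_ definition above) =====
theorem is_special_array_spec : Claim_equal_is_special_array := by
  intro lst _
  unfold Spec_is_special_array is_special_array is_special_array_alt
  exact (loop_eq lst).1
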